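-- pv_equiv track=rewrite | github.com/nfatkhi/stocker | tools/unified_dataset_organizer.py | _categorize_universal_concepts
-- ===== SOURCE A (Python) =====
-- from typing import Dict, Any, List, Optional
-- from typing import Dict, Any, List, Optional
-- from typing import Dict, Any, List, Optional
--
-- def _categorize_universal_concepts(all_concepts: Dict[str, Any]) -> Dict[str, List[str]]:
--     """Categorize concepts into financial statement categories"""
--     categories = {
--         'revenue': [],
--         'operating_cash_flow': [],
--         'net_income': [],
--         'assets': [],
--         'liabilities': [],
--         'equity': [],
--         'expenses': [],
--         'other_income': [],
--         'shares': [],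
--         'per_share_metrics': [],
--         'segment_data': [],
--         'other': []
--     }
--
--     # Define universal patterns (works for all companies/industries)
--     patterns = {
--         'revenue': [
--             'revenue', 'sales', 'income', 'rental', 'property', 'service', 'product',
--             'subscription', 'interest', 'fee', 'commission', 'royalty'
--         ],
--         'operating_cash_flow': [
--             'netcashprovided', 'cashflow', 'operatingactivities', 'operating'
--         ],
--         'net_income': [
--             'netincome', 'netloss', 'profit', 'earnings', 'comprehensive'
--         ],
--         'assets': [
--             'assets', 'property', 'equipment', 'investment', 'cash', 'receivable',
--             'inventory', 'goodwill', 'intangible'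
--         ],
--         'liabilities': [
--             'liabilities', 'debt', 'payable', 'accrued', 'deferred', 'obligation'
--         ],
--         'equity': [
--             'equity', 'capital', 'retained', 'stockholder', 'shareholder'
--         ],
--         'expenses': [
--             'expense', 'cost', 'depreciation', 'amortization', 'impairment'
--         ],
--         'shares': [
--             'shares', 'stock', 'outstanding', 'issued', 'weighted'
--         ],
--         'per_share_metrics': [
--             'pershare', 'persharebas', 'pershadilut', 'earnings', 'dividend'
--         ],
--         'segment_data': [
--             'segment', 'geography', 'region', 'division', 'subsidiary'
--         ]
--     }
--
--     # Categorize each concept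
--     for concept, data in all_concepts.items():
--         concept_lower = concept.lower()
--         categorized = False
--
--         for category, keywords in patterns.items():
--             if any(keyword in concept_lower for keyword in keywords):
--                 categories[category].append(concept)
--                 categorized = True
--                 break
--
--         if not categorized:
--             categories['other'].append(concept)
--
--     return categories
-- ===== SOURCE B (Python) =====
-- _KEYWORD_TABLE = [
--     ('revenue', 'revenue sales income rental property service product subscription interest fee commission royalty'),
--     ('operating_cash_flow', 'netcashprovided cashflow operatingactivities operating'),
--     ('net_income', 'netincome netloss profit earnings comprehensive'),
--     ('assets', 'assets property equipment investment cash receivable inventory goodwill intangible'),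
--     ('liabilities', 'liabilities debt payable accrued deferred obligation'),
--     ('equity', 'equity capital retained stockholder shareholder'),
--     ('expenses', 'expense cost depreciation amortization impairment'),
--     ('shares', 'shares stock outstanding issued weighted'),
--     ('per_share_metrics', 'pershare persharebas pershadilut earnings dividend'),
--     ('segment_data', 'segment geography region division subsidiary'),
-- ]
-- # flattening keeps the first-match priority: pairs of earlier categories come first,
-- # and any keyword of a category yields that same category name
-- _FLAT = [(cat, kw) for cat, kws in _KEYWORD_TABLE for kw in kws.split()]
-- _ORDER = ['revenue', 'operating_cash_flow', 'net_income', 'assets', 'liabilities',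
--           'equity', 'expenses', 'other_income', 'shares', 'per_share_metrics',
--           'segment_data', 'other']
--
-- def _label(concept):
--     cl = concept.lower()
--     for cat, kw in _FLAT:
--         if kw in cl:
--             return cat
--     return 'other'
--
-- def _categorize_universal_concepts(all_concepts):
--     """Categorize concepts: label each concept once, then group by label."""
--     return {cat: [c for c in all_concepts if _label(c) == cat] for cat in _ORDER}
-- ===== Notes on version B (the rewrite author's own statement) =====
-- stated objective: alternative
-- what changed: B flattens the patterns dict into an ordered (category, keyword) pair list, labels each concept with the category of the first matching pair ('other' if none), and builds the result by grouping the concepts by label in one dict comprehension, instead of A's concept-by-concept loop that appends into mutable buckets and breaks on the first matching category.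
import Mathlib
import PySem

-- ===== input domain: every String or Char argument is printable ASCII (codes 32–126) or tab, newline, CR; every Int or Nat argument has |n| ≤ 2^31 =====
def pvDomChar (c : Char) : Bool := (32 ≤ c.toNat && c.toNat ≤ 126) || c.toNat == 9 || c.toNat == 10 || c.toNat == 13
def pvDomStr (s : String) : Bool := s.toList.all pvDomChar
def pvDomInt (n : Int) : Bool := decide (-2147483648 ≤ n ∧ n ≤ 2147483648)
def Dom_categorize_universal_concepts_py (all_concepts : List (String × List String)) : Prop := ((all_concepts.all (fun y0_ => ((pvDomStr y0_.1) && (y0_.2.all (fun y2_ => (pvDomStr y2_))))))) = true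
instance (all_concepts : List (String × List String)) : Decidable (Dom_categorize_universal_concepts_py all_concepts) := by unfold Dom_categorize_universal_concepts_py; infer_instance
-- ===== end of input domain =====

-- B labels each concept once via a flattened (category, keyword) list (first matching pair wins)
-- and builds the result by grouping the concepts by label, instead of A's fold that appends each
-- concept to a mutable bucket of the first category with a matching keyword; objective: alternative
-- decomposition, same kind of cost.

-- ===== PORT A =====
def pvKeys : List String :=
  ["revenue", "operating_cash_flow", "net_income", "assets", "liabilities", "equity",
   "expenses", "other_income", "shares", "per_share_metrics", "segment_data", "other"]

def pvPatterns : List (String × List String) :=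
  [("revenue", ["revenue", "sales", "income", "rental", "property", "service", "product",
                "subscription", "interest", "fee", "commission", "royalty"]),
   ("operating_cash_flow", ["netcashprovided", "cashflow", "operatingactivities", "operating"]),
   ("net_income", ["netincome", "netloss", "profit", "earnings", "comprehensive"]),
   ("assets", ["assets", "property", "equipment", "investment", "cash", "receivable",
               "inventory", "goodwill", "intangible"]),
   ("liabilities", ["liabilities", "debt", "payable", "accrued", "deferred", "obligation"]),
   ("equity", ["equity", "capital", "retained", "stockholder", "shareholder"]),
   ("expenses", ["expense", "cost", "depreciation", "amortization", "impairment"]),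
   ("shares", ["shares", "stock", "outstanding", "issued", "weighted"]),
   ("per_share_metrics", ["pershare", "persharebas", "pershadilut", "earnings", "dividend"]),
   ("segment_data", ["segment", "geography", "region", "division", "subsidiary"])]

def pvCatsInit : List (String × List String) := pvKeys.map (fun k => (k, []))

-- categories[k].append(c): the dict value at key k is extended in place (position kept)
def pvAppendAt (cats : List (String × List String)) (k : String) (c : String) : List (String × List String) :=
  cats.map (fun p => if p.1 = k then (p.1, p.2 ++ [c]) else p)

def categorize_universal_concepts_py (all_concepts : List (String × List String)) : List (String × List String) :=
  all_concepts.foldl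
    (fun cats cd =>
      let concept_lower := PySem.Str.lower cd.1
      -- 'for category, keywords in patterns.items(): if any(...): append; break' = first matching pattern
      match pvPatterns.find? (fun p => p.2.any (fun kw => PySem.Str.isIn kw concept_lower)) with
      | some p => pvAppendAt cats p.1 cd.1
      | none   => pvAppendAt cats "other" cd.1)
    pvCatsInit

-- ===== PORT B =====
def pvCatTable : List (String × String) :=
  [("revenue", "revenue sales income rental property service product subscription interest fee commission royalty"),
   ("operating_cash_flow", "netcashprovided cashflow operatingactivities operating"),
   ("net_income", "netincome netloss profit earnings comprehensive"),
   ("assets", "assets property equipment investment cash receivable inventory goodwill intangible"),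
   ("liabilities", "liabilities debt payable accrued deferred obligation"),
   ("equity", "equity capital retained stockholder shareholder"),
   ("expenses", "expense cost depreciation amortization impairment"),
   ("shares", "shares stock outstanding issued weighted"),
   ("per_share_metrics", "pershare persharebas pershadilut earnings dividend"),
   ("segment_data", "segment geography region division subsidiary")]

-- _FLAT = [(cat, kw) for cat, kws in _KEYWORD_TABLE for kw in kws.split()]
def pvFlat : List (String × String) :=
  pvCatTable.flatMap (fun row => (PySem.Str.split₀ row.2).map (fun kw => (row.1, kw)))

-- _label: first (cat, kw) pair whose keyword occurs in concept.lower(), else 'other'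
def pvLabel (concept : String) : String :=
  let cl := PySem.Str.lower concept
  match pvFlat.find? (fun pair => PySem.Str.isIn pair.2 cl) with
  | some pair => pair.1
  | none => "other"

def pvOrder : List String :=
  ["revenue", "operating_cash_flow", "net_income", "assets", "liabilities", "equity",
   "expenses", "other_income", "shares", "per_share_metrics", "segment_data", "other"]

def categorize_universal_concepts_py_alt (all_concepts : List (String × List String)) : List (String × List String) :=
  pvOrder.map (fun cat => (cat, (all_concepts.filter (fun cd => pvLabel cd.1 = cat)).map Prod.fst))

-- ===== PRECONDITION & SPEC =====
def Spec_categorize_universal_concepts_py (all_concepts : List (String × List String)) (out : List (String × List String)) : Prop := out = categorize_universal_concepts_py_alt all_concepts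
instance (all_concepts : List (String × List String)) (out : List (String × List String)) : Decidable (Spec_categorize_universal_concepts_py all_concepts out) := by unfold Spec_categorize_universal_concepts_py; infer_instance

-- ===== CLAIM =====
def Claim_equal_categorize_universal_concepts_py : Prop := ∀ (all_concepts : List (String × List String)), Dom_categorize_universal_concepts_py all_concepts → Spec_categorize_universal_concepts_py all_concepts (categorize_universal_concepts_py all_concepts)

-- ===== LEMMAS AND PROOFS =====

-- the matching predicate A uses, and the category A assigns a concept to
def pvPred (c : String) : (String × List String) → Bool :=
  fun p => p.2.any (fun kw => PySem.Str.isIn kw (PySem.Str.lower c))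

def pvCatOf (c : String) : String :=
  match pvPatterns.find? (pvPred c) with
  | some p => p.1
  | none   => "other"

theorem pvAppendAt_map (L : List String) (g : String → List String) (k0 c : String) :
    pvAppendAt (L.map (fun k => (k, g k))) k0 c
      = L.map (fun k => (k, g k ++ if k = k0 then [c] else [])) := by
  simp only [pvAppendAt, List.map_map]
  refine List.map_congr_left (fun k _ => ?_)
  by_cases h : k = k0 <;> simp [h]

-- A's fold, characterized: each bucket collects the concepts whose pvCatOf is its key
theorem portA_inv (l : List (String × List String)) :
    ∀ (g : String → List String),
      l.foldl
        (fun cats cd =>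
          match pvPatterns.find? (fun p => p.2.any (fun kw => PySem.Str.isIn kw (PySem.Str.lower cd.1))) with
          | some p => pvAppendAt cats p.1 cd.1
          | none   => pvAppendAt cats "other" cd.1)
        (pvKeys.map (fun k => (k, g k)))
      = pvKeys.map (fun k => (k, g k ++ (l.map Prod.fst).filter (fun c => pvCatOf c = k))) := by
  induction l with
  | nil => intro g; simp
  | cons cd t ih =>
    intro g
    have hstep :
        (match pvPatterns.find? (fun p => p.2.any (fun kw => PySem.Str.isIn kw (PySem.Str.lower cd.1))) with
         | some p => pvAppendAt (pvKeys.map (fun k => (k, g k))) p.1 cd.1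
         | none   => pvAppendAt (pvKeys.map (fun k => (k, g k))) "other" cd.1)
        = pvKeys.map (fun k => (k, g k ++ if k = pvCatOf cd.1 then [cd.1] else [])) := by
      unfold pvCatOf pvPred
      cases hf : pvPatterns.find? (fun p => p.2.any (fun kw => PySem.Str.isIn kw (PySem.Str.lower cd.1))) with
      | none => simp [pvAppendAt_map]
      | some p => simp [pvAppendAt_map]
    simp only [List.foldl_cons, hstep, ih]
    refine List.map_congr_left (fun k _ => ?_)
    by_cases h : k = pvCatOf cd.1 <;>
      simp [h, eq_comm, List.append_assoc]

-- the flattened keyword list of B is exactly pvPatterns flattened pairwise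
theorem pvFlat_eq :
    pvFlat = pvPatterns.flatMap (fun p => p.2.map (fun kw => (p.1, kw))) := by decide

-- first match in the flattened list = first category with any matching keyword
theorem find_flat (P : String → Bool) (ps : List (String × List String)) :
    (match (ps.flatMap (fun p => p.2.map (fun kw => (p.1, kw)))).find? (fun q => P q.2) with
     | some q => q.1
     | none => "other")
    = (match ps.find? (fun p => p.2.any P) with
       | some p => p.1
       | none => "other") := by
  induction ps with
  | nil => simp
  | cons p rest ih =>
    simp only [List.flatMap_cons, List.find?_append, List.find?_cons]
    have hm : ((p.2.map (fun kw => (p.1, kw))).find? (fun q => P q.2))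
        = (p.2.find? P).map (fun kw => (p.1, kw)) := by
      rw [List.find?_map]; rfl
    cases hf : p.2.find? P with
    | some kw =>
      have hany : p.2.any P = true :=
        List.any_eq_true.2 ⟨kw, List.mem_of_find?_eq_some hf, List.find?_some hf⟩
      simp [hm, hf, hany, Option.or]
    | none =>
      have hany : p.2.any P = false := by
        rw [List.any_eq_false]; intro x hx; exact (List.find?_eq_none.1 hf) x hx
      simpa [hm, hf, hany, Option.or] using ih

-- B's label agrees with the category A assigns
theorem label_eq_catOf (c : String) : pvLabel c = pvCatOf c := by
  unfold pvLabel pvCatOf pvPred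
  rw [pvFlat_eq]
  exact find_flat (fun kw => PySem.Str.isIn kw (PySem.Str.lower c)) pvPatterns

theorem filter_fst {α β : Type} (p : α → Bool) :
    ∀ (l : List (α × β)), (l.filter (fun x => p x.1)).map Prod.fst = (l.map Prod.fst).filter p := by
  intro l
  induction l with
  | nil => rfl
  | cons x t ih =>
    cases hp : p x.1 <;> simp [hp, ih]

-- ===== VERDICT =====
theorem categorize_universal_concepts_py_spec : Claim_equal_categorize_universal_concepts_py := by
  intro ac _hdom
  unfold Spec_categorize_universal_concepts_py
  have hA : categorize_universal_concepts_py ac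
      = pvKeys.map (fun k => (k, (ac.map Prod.fst).filter (fun c => pvCatOf c = k))) := by
    have h := portA_inv ac (fun _ => [])
    simpa [categorize_universal_concepts_py, pvCatsInit] using h
  rw [hA]
  have hord : pvOrder = pvKeys := rfl
  simp only [categorize_universal_concepts_py_alt, hord]
  refine List.map_congr_left (fun k _ => ?_)
  refine congrArg _ ?_
  rw [filter_fst (fun c => decide (pvLabel c = k))]
  refine (List.filter_congr (fun c _ => ?_)).symm
  rw [label_eq_catOf]
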